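-- pv_equiv track=rewrite | github.com/mhtruong1031/OpenENV-Hackathon | training_script.py | select_reward_key
-- ===== SOURCE A (Python) =====
-- from numbers import Real
-- from typing import Any, Dict, List, Optional, Sequence, Tuple
--
-- def is_numeric_log_value(value: Any) -> bool:
--     return isinstance(value, Real) and not isinstance(value, bool)
--
-- def available_numeric_log_keys(log_history: Sequence[Dict[str, Any]]) -> List[str]:
--     keys = {
--         key
--         for entry in log_history
--         if isinstance(entry, dict)
--         for key, value in entry.items()
--         if key != "step" and is_numeric_log_value(value)
--     }
--     return sorted(keys)
--
-- def select_reward_key(log_history: Sequence[Dict[str, Any]]) -> Optional[str]: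
--     numeric_keys = available_numeric_log_keys(log_history)
--     reward_keys = [key for key in numeric_keys if "reward" in key.lower()]
--     if not reward_keys:
--         return None
--
--     preferred = [
--         "reward",
--         "mean_reward",
--         "reward_mean",
--         "rewards/open_env_reward",
--     ]
--     lowered = {key.lower(): key for key in reward_keys}
--     for key in preferred:
--         if key in lowered:
--             return lowered[key]
--
--     reward_keys.sort(key=lambda key: ("/" in key, len(key), key))
--     return reward_keys[0]
-- ===== SOURCE B (Python) =====
-- from numbers import Real
--
--
-- def is_numeric_log_value(value):
--     return isinstance(value, Real) and not isinstance(value, bool)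
--
--
-- _PREFERRED = ["reward", "mean_reward", "reward_mean", "rewards/open_env_reward"]
--
--
-- def _rank(key):
--     low = key.lower()
--     priority = _PREFERRED.index(low) if low in _PREFERRED else len(_PREFERRED)
--     return (priority, "/" in key, len(key), key)
--
--
-- def select_reward_key(log_history):
--     best = None
--     for entry in log_history:
--         if isinstance(entry, dict):
--             for key, value in entry.items():
--                 if key == "step" or not is_numeric_log_value(value):
--                     continue
--                 if "reward" not in key.lower():
--                     continue
--                 if best is None or _rank(key) < _rank(best):
--                     best = key
--     return best
-- ===== Notes on version B (the rewrite author's own statement) =====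
-- stated objective: simpler
-- what changed: B replaces A's staged pipeline (build a set of numeric keys, sort it, filter, lowercase dict, preferred-list loop, fallback sort) with one streaming pass that keeps the single best key under a total rank (preferred index, slash, length, key); Pre_ excludes logs where two distinct keys lowercase to the same preferred name, on which A's dict-last-wins reinsertion choice is accidental.
-- outside the precondition, e.g. on select_reward_key([{'Reward': 1, 'reward': 2}]): A returns 'reward', B returns 'Reward'
import Mathlib
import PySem

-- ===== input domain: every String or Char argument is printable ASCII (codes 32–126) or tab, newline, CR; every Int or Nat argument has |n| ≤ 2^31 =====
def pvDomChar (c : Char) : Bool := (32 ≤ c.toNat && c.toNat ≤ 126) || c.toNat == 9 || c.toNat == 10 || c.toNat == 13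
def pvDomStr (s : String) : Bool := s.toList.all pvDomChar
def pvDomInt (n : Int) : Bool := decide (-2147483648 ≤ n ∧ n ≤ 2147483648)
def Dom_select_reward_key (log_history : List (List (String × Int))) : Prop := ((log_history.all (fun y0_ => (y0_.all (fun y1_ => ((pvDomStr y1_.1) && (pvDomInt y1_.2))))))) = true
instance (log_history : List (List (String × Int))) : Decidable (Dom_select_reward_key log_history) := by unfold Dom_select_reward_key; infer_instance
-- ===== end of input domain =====

-- B replaces A's staged pipeline (set of keys, sort, filter, lowercase dict, preferred loop,
-- fallback sort) with one streaming pass keeping the best key under a total rank; objective: simpler.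

-- literal constant shared by both Pythons
def srkPreferred : List String := ["reward", "mean_reward", "reward_mean", "rewards/open_env_reward"]

-- ===== PORT A =====
-- is_numeric_log_value(value) is True for every Int value (isinstance checks are type-level),
-- so the numeric test is ported as `true` on the Int domain.
def srkKey1 (k : String) : Lex (Nat × Int) :=
  toLex ((if PySem.Str.isIn "/" k then 1 else 0), PySem.Str.len k)

def select_reward_key (log_history : List (List (String × Int))) : Option String :=
  let keys : PySem.Set String :=
    log_history.foldl (fun s entry =>
      entry.foldl (fun s kv => if kv.1 ≠ "step" then PySem.Set.add s kv.1 else s) s)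
      PySem.Set.empty
  let numeric_keys := PySem.List.sorted keys (fun k => k) false
  let reward_keys := numeric_keys.filter (fun k => PySem.Str.isIn "reward" (PySem.Str.lower k))
  if reward_keys = [] then none
  else
    let lowered : PySem.Dict String String :=
      reward_keys.foldl (fun d k => d.insert (PySem.Str.lower k) k) PySem.Dict.empty
    match srkPreferred.findSome? (fun p => lowered.get? p) with
    | some v => some v
    | none => PySem.List.pyGet? (PySem.List.sorted2 reward_keys srkKey1 (fun k => k) false) 0

-- ===== PORT B =====
-- _rank(key) = (priority, "/" in key, len(key), key), compared lexicographically (Lex-encoded tuple)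
def srkKeyL (k : String) : Lex (Lex (Nat × Int) × String) := toLex (srkKey1 k, k)

def srkRank (k : String) : Lex (Nat × Lex (Lex (Nat × Int) × String)) :=
  toLex ((PySem.List.index? srkPreferred (PySem.Str.lower k)).getD srkPreferred.length,
    srkKeyL k)

-- streaming pass: for each (key, value) pair, skip "step"/non-reward keys, keep the rank-smallest key
def select_reward_key_alt (log_history : List (List (String × Int))) : Option String :=
  log_history.foldl (fun best entry =>
    entry.foldl (fun best kv =>
      if kv.1 = "step" then best
      else if ¬ PySem.Str.isIn "reward" (PySem.Str.lower kv.1) then best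
      else match best with
        | none => some kv.1
        | some b => if srkRank kv.1 < srkRank b then some kv.1 else some b) best) none

-- ===== PRECONDITION & SPEC =====
-- the distinct-ignoring occurrence list of numeric reward keys in the log
def srkOcc (log_history : List (List (String × Int))) : List String :=
  (log_history.flatten.map Prod.fst).filter
    (fun k => decide (k ≠ "step") && PySem.Str.isIn "reward" (PySem.Str.lower k))

-- Pre_ excludes logs in which two DISTINCT numeric reward keys lowercase to the same preferred
-- name: there A's choice among them (dict last-wins over the sorted keys) is accidental.
def Pre_select_reward_key (log_history : List (List (String × Int))) : Prop :=
  ∀ k1 ∈ srkOcc log_history, ∀ k2 ∈ srkOcc log_history,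
    PySem.Str.lower k1 = PySem.Str.lower k2 →
    PySem.Str.lower k1 ∈ ["reward", "mean_reward", "reward_mean", "rewards/open_env_reward"] →
    k1 = k2
instance (log_history : List (List (String × Int))) : Decidable (Pre_select_reward_key log_history) := by unfold Pre_select_reward_key; infer_instance

def pvWitness_select_reward_key : (List (List (String × Int))) := [[("reward", 1), ("step", 2)], [("loss", 0)]]

def Spec_select_reward_key (log_history : List (List (String × Int))) (out : Option String) : Prop := out = select_reward_key_alt log_history
instance (log_history : List (List (String × Int))) (out : Option String) : Decidable (Spec_select_reward_key log_history out) := by unfold Spec_select_reward_key; infer_instance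

-- ===== CLAIM =====
def Claim_equal_select_reward_key : Prop := ∀ (log_history : List (List (String × Int))), Dom_select_reward_key log_history → Pre_select_reward_key log_history → Spec_select_reward_key log_history (select_reward_key log_history)

-- ===== LEMMAS AND PROOFS =====
-- B's running-min step on a bare key
def srkStep (best : Option String) (k : String) : Option String :=
  match best with
  | none => some k
  | some b => if srkRank k < srkRank b then some k else some b

theorem srk_alt_eq_min? (lh : List (List (String × Int))) :
    select_reward_key_alt lh = PySem.List.min? (srkOcc lh) srkRank := by
  have h1 : select_reward_key_alt lh
      = lh.flatten.foldl (fun best kv =>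
          if kv.1 = "step" then best
          else if ¬ PySem.Str.isIn "reward" (PySem.Str.lower kv.1) then best
          else srkStep best kv.1) none := by
    rw [List.foldl_flatten]; rfl
  have h2 : ∀ (L : List (String × Int)) (acc : Option String),
      L.foldl (fun best kv =>
          if kv.1 = "step" then best
          else if ¬ PySem.Str.isIn "reward" (PySem.Str.lower kv.1) then best
          else srkStep best kv.1) acc
        = ((L.map Prod.fst).filter
            (fun k => decide (k ≠ "step") && PySem.Str.isIn "reward" (PySem.Str.lower k))).foldl
            srkStep acc := by
    intro L
    induction L with
    | nil => intro acc; rfl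
    | cons kv t ih =>
      intro acc
      simp only [List.foldl_cons, List.map_cons, List.filter_cons]
      by_cases hs : kv.1 = "step"
      · rw [if_pos hs,
          if_neg (by simp only [Bool.and_eq_true, decide_eq_true_eq]; exact fun h => h.1 hs), ih]
      · by_cases hr : PySem.Str.isIn "reward" (PySem.Str.lower kv.1)
        · rw [if_neg hs, if_neg (not_not_intro hr),
            if_pos (by simp only [Bool.and_eq_true, decide_eq_true_eq]; exact ⟨hs, hr⟩),
            List.foldl_cons, ih]
        · rw [if_neg hs, if_pos hr,
            if_neg (by simp only [Bool.and_eq_true, decide_eq_true_eq]; exact fun h => hr h.2), ih]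
  rw [h1, h2]
  unfold srkOcc PySem.List.min? srkStep
  congr 1
  funext acc x
  cases acc with
  | none => rfl
  | some m => dsimp only

theorem srkRank_inj (a b : String) (h : srkRank a = srkRank b) : a = b := by
  unfold srkRank srkKeyL at h
  have := congrArg (fun x => (ofLex (ofLex x).2).2) h
  simpa using this

-- min? with a key injective on the list is determined by membership + minimality
theorem srk_min?_eq_some {κ : Type} [LinearOrder κ] (key : String → κ) (l : List String)
    (m : String) (hm : m ∈ l) (hmin : ∀ x ∈ l, key m ≤ key x)
    (hinj : ∀ y ∈ l, key y = key m → y = m) :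
    PySem.List.min? l key = some m := by
  cases hq : PySem.List.min? l key with
  | none =>
    rw [PySem.List.min?_eq_none_iff] at hq
    subst hq; cases hm
  | some m' =>
    have h1 : m' ∈ l := PySem.List.min?_mem hq
    have h2 : ∀ y ∈ l, key m' ≤ key y := PySem.List.min?_isMin hq
    have : key m' = key m := le_antisymm (h2 m hm) (hmin m' h1)
    rw [hinj m' h1 this]

-- A's set fold: membership characterisation
theorem srk_mem_inner (entry : List (String × Int)) (s : List String) (x : String) :
    (x ∈ entry.foldl (fun s kv => if kv.1 ≠ "step" then PySem.Set.add s kv.1 else s) s)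
      ↔ x ∈ s ∨ (x ∈ entry.map Prod.fst ∧ x ≠ "step") := by
  induction entry generalizing s with
  | nil => simp
  | cons kv t ih =>
    simp only [List.foldl_cons, List.map_cons, List.mem_cons]
    by_cases hs : kv.1 ≠ "step"
    · rw [if_pos hs, ih, PySem.Set.mem_add]
      constructor
      · rintro ((h | rfl) | ⟨hm, hx⟩)
        · exact Or.inl h
        · exact Or.inr ⟨Or.inl rfl, hs⟩
        · exact Or.inr ⟨Or.inr hm, hx⟩
      · rintro (h | ⟨(rfl | hm), hx⟩)
        · exact Or.inl (Or.inl h)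
        · exact Or.inl (Or.inr rfl)
        · exact Or.inr ⟨hm, hx⟩
    · rw [if_neg hs, ih]
      have hs' : kv.1 = "step" := not_not.mp hs
      constructor
      · rintro (h | ⟨hm, hx⟩)
        · exact Or.inl h
        · exact Or.inr ⟨Or.inr hm, hx⟩
      · rintro (h | ⟨(rfl | hm), hx⟩)
        · exact Or.inl h
        · exact absurd hs' hx
        · exact Or.inr ⟨hm, hx⟩

theorem srk_mem_set (lh : List (List (String × Int))) (s : List String) (x : String) :
    (x ∈ lh.foldl (fun s entry =>
        entry.foldl (fun s kv => if kv.1 ≠ "step" then PySem.Set.add s kv.1 else s) s) s)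
      ↔ x ∈ s ∨ (x ∈ lh.flatten.map Prod.fst ∧ x ≠ "step") := by
  induction lh generalizing s with
  | nil => simp
  | cons e t ih =>
    simp only [List.foldl_cons, List.flatten_cons, List.map_append, List.mem_append]
    rw [ih, srk_mem_inner]
    tauto

-- the lowered dict looks up the LAST key of the list whose lowercase is p
theorem srk_get_fold_insert (l : List String) (d : PySem.Dict String String) (p : String) :
    (l.foldl (fun d k => d.insert (PySem.Str.lower k) k) d).get? p
      = ((l.filter (fun k => PySem.Str.lower k == p)).getLast?).or (d.get? p) := by
  induction l generalizing d with
  | nil => simp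
  | cons k t ih =>
    simp only [List.foldl_cons, List.filter_cons]
    by_cases h : PySem.Str.lower k = p
    · rw [if_pos (by simpa using h)]
      rw [ih]
      have hcons : ∀ (tf : List String), (k :: tf).getLast? = tf.getLast?.or (some k) := by
        intro tf
        cases tf with
        | nil => rfl
        | cons a b =>
          rw [List.getLast?_cons_cons]
          cases hb : (a :: b).getLast? with
          | none => rw [List.getLast?_eq_none_iff] at hb; cases hb
          | some v => rfl
      rw [hcons, Option.or_assoc]
      congr 1
      rw [h, PySem.Dict.get?_insert_self]
      cases (d.get? p) <;> rfl
    · rw [if_neg (by simpa using h)]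
      rw [ih]
      congr 1
      exact PySem.Dict.get?_insert_of_ne d k (fun hc => h hc.symm)

-- the priority component of the rank, as used by B
def srkPrio (k : String) : Nat :=
  (PySem.List.index? srkPreferred (PySem.Str.lower k)).getD srkPreferred.length

theorem srkRank_eq (k : String) : srkRank k = toLex (srkPrio k, srkKeyL k) := rfl

theorem srk_lex_decide {k1 k2 : Type} [LinearOrder k1] [LinearOrder k2] (a b : k1) (c d : k2) :
    (decide (a < b) || !decide (b < a) && decide (c < d))
      = decide (toLex (a, c) < toLex (b, d)) := by
  rcases lt_trichotomy a b with h | h | h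
  · simp [Prod.Lex.lt_iff, h]
  · simp [Prod.Lex.lt_iff, h]
  · simp [Prod.Lex.lt_iff, h, lt_asymm h, (ne_of_gt h)]

theorem srk_sorted2_eq (xs : List String) :
    PySem.List.sorted2 xs srkKey1 (fun k => k) false
      = PySem.List.sorted xs srkKeyL false := by
  rw [PySem.List.sorted_eq_foldl_insertBy]
  simp only [PySem.List.sorted2]
  congr 1
  funext acc x
  congr 1
  funext a b
  exact srk_lex_decide (srkKey1 a) (srkKey1 b) a b

theorem srkPrio_eq (k : String) : srkPrio k =
    if PySem.Str.lower k = "reward" then 0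
    else if PySem.Str.lower k = "mean_reward" then 1
    else if PySem.Str.lower k = "reward_mean" then 2
    else if PySem.Str.lower k = "rewards/open_env_reward" then 3
    else 4 := by
  unfold srkPrio srkPreferred
  by_cases h0 : PySem.Str.lower k = "reward"
  · rw [h0, PySem.List.index?_cons_self]; simp
  · rw [PySem.List.index?_cons_of_ne _ (Ne.symm h0)]
    by_cases h1 : PySem.Str.lower k = "mean_reward"
    · rw [h1, PySem.List.index?_cons_self]; simp
    · rw [PySem.List.index?_cons_of_ne _ (Ne.symm h1)]
      by_cases h2 : PySem.Str.lower k = "reward_mean"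
      · rw [h2, PySem.List.index?_cons_self]; simp
      · rw [PySem.List.index?_cons_of_ne _ (Ne.symm h2)]
        by_cases h3 : PySem.Str.lower k = "rewards/open_env_reward"
        · rw [h3, PySem.List.index?_cons_self]; simp
        · rw [PySem.List.index?_cons_of_ne _ (Ne.symm h3)]
          simp [h0, h1, h2, h3, PySem.List.index?]

theorem srkPrio_iff0 (k : String) : srkPrio k = 0 ↔ PySem.Str.lower k = "reward" := by
  rw [srkPrio_eq]; split_ifs <;> simp_all

theorem srkPrio_iff1 (k : String) : srkPrio k = 1 ↔ PySem.Str.lower k = "mean_reward" := by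
  rw [srkPrio_eq]; split_ifs <;> simp_all

theorem srkPrio_iff2 (k : String) : srkPrio k = 2 ↔ PySem.Str.lower k = "reward_mean" := by
  rw [srkPrio_eq]; split_ifs <;> simp_all

theorem srkPrio_iff3 (k : String) : srkPrio k = 3 ↔ PySem.Str.lower k = "rewards/open_env_reward" := by
  rw [srkPrio_eq]; split_ifs <;> simp_all

theorem srkPrio_four (k : String) (h0 : PySem.Str.lower k ≠ "reward")
    (h1 : PySem.Str.lower k ≠ "mean_reward") (h2 : PySem.Str.lower k ≠ "reward_mean")
    (h3 : PySem.Str.lower k ≠ "rewards/open_env_reward") : srkPrio k = 4 := by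
  rw [srkPrio_eq]; simp [h0, h1, h2, h3]

theorem srkRank_le_of_prio_lt (a b : String) (h : srkPrio a < srkPrio b) :
    srkRank a ≤ srkRank b := by
  rw [srkRank_eq, srkRank_eq, Prod.Lex.le_iff]
  exact Or.inl h

theorem srkRank_le_of_keyL_le (a b : String) (hp : srkPrio a = srkPrio b)
    (h : srkKeyL a ≤ srkKeyL b) : srkRank a ≤ srkRank b := by
  rw [srkRank_eq, srkRank_eq, Prod.Lex.le_iff]
  exact Or.inr ⟨hp, h⟩

-- the preferred-key branch: under Pre_, A's dict lookup and B's rank-min pick the same key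
theorem srk_pref_branch (RK FK : List String)
    (hmem : ∀ k, k ∈ RK ↔ k ∈ FK)
    (hpre : ∀ k1 ∈ FK, ∀ k2 ∈ FK, PySem.Str.lower k1 = PySem.Str.lower k2 →
      PySem.Str.lower k1 ∈ ["reward", "mean_reward", "reward_mean", "rewards/open_env_reward"] →
      k1 = k2)
    (i : Nat) (p : String)
    (hp_mem : p ∈ (["reward", "mean_reward", "reward_mean", "rewards/open_env_reward"] : List String))
    (hpi : ∀ k, srkPrio k = i ↔ PySem.Str.lower k = p)
    (hlow : ∀ k ∈ RK, i ≤ srkPrio k)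
    (hne : RK.filter (fun k => PySem.Str.lower k == p) ≠ []) :
    PySem.List.min? FK srkRank
      = some ((RK.filter (fun k => PySem.Str.lower k == p)).getLast hne) := by
  set m := (RK.filter (fun k => PySem.Str.lower k == p)).getLast hne with hm
  have hmf : m ∈ RK.filter (fun k => PySem.Str.lower k == p) := List.getLast_mem hne
  have hmRK : m ∈ RK := (List.mem_filter.mp hmf).1
  have hml : PySem.Str.lower m = p := by simpa using (List.mem_filter.mp hmf).2
  have hmFK : m ∈ FK := (hmem m).mp hmRK
  have hmp : srkPrio m = i := (hpi m).mpr hml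
  apply srk_min?_eq_some
  · exact hmFK
  · intro x hx
    have hxRK : x ∈ RK := (hmem x).mpr hx
    rcases lt_or_eq_of_le (hlow x hxRK) with h | h
    · rw [← hmp] at h
      exact srkRank_le_of_prio_lt m x h
    · have hxl : PySem.Str.lower x = p := (hpi x).mp h.symm
      have : x = m := hpre x hx m hmFK (by rw [hxl, hml]) (by rw [hxl]; exact hp_mem)
      rw [this]
  · exact fun y _ h => srkRank_inj y m h

-- the core equality between A's staged pipeline and B's rank-min, over the reward-key lists
theorem srk_core (RK FK : List String)
    (hmem : ∀ k, k ∈ RK ↔ k ∈ FK)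
    (hpre : ∀ k1 ∈ FK, ∀ k2 ∈ FK, PySem.Str.lower k1 = PySem.Str.lower k2 →
      PySem.Str.lower k1 ∈ ["reward", "mean_reward", "reward_mean", "rewards/open_env_reward"] →
      k1 = k2) :
    (if RK = [] then none
     else
       match srkPreferred.findSome?
           (fun q => (RK.foldl (fun d k => d.insert (PySem.Str.lower k) k) PySem.Dict.empty).get? q) with
       | some v => some v
       | none => PySem.List.pyGet? (PySem.List.sorted2 RK srkKey1 (fun k => k) false) 0)
    = PySem.List.min? FK srkRank := by
  by_cases hE : RK = []
  · have hFK : FK = [] := by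
      rw [List.eq_nil_iff_forall_not_mem]
      intro x hx
      rw [← hmem x, hE] at hx
      cases hx
    rw [if_pos hE, hFK]
    rfl
  · rw [if_neg hE]
    have hget : ∀ q, ((RK.foldl (fun d k => d.insert (PySem.Str.lower k) k) PySem.Dict.empty).get? q)
        = (RK.filter (fun k => PySem.Str.lower k == q)).getLast? := by
      intro q
      rw [srk_get_fold_insert]
      simp [PySem.Dict.get?_empty]
    by_cases h0 : RK.filter (fun k => PySem.Str.lower k == "reward") = []
    · by_cases h1 : RK.filter (fun k => PySem.Str.lower k == "mean_reward") = []
      · by_cases h2 : RK.filter (fun k => PySem.Str.lower k == "reward_mean") = []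
        · by_cases h3 : RK.filter (fun k => PySem.Str.lower k == "rewards/open_env_reward") = []
          · -- fallback: no preferred key present; A takes the head of the (slash, len, key) sort
            have hall : ∀ k ∈ RK, srkPrio k = 4 := by
              intro k hk
              refine srkPrio_four k ?_ ?_ ?_ ?_
              · exact fun hl => absurd h0 (List.ne_nil_of_mem (List.mem_filter.mpr ⟨hk, by simp [hl]⟩))
              · exact fun hl => absurd h1 (List.ne_nil_of_mem (List.mem_filter.mpr ⟨hk, by simp [hl]⟩))
              · exact fun hl => absurd h2 (List.ne_nil_of_mem (List.mem_filter.mpr ⟨hk, by simp [hl]⟩))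
              · exact fun hl => absurd h3 (List.ne_nil_of_mem (List.mem_filter.mpr ⟨hk, by simp [hl]⟩))
            have hA : srkPreferred.findSome?
                (fun q => ((RK.foldl (fun d k => d.insert (PySem.Str.lower k) k) PySem.Dict.empty).get? q)) = none := by
              simp only [srkPreferred, List.findSome?_cons, hget, h0, h1, h2, h3,
                List.getLast?_nil, List.findSome?_nil]
            rw [hA]
            dsimp only
            rw [srk_sorted2_eq]
            cases hs : PySem.List.sorted RK srkKeyL false with
            | nil => exact absurd ((PySem.List.sorted_eq_nil_iff RK srkKeyL false).mp hs) hE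
            | cons m t =>
              rw [PySem.List.pyGet?_zero_cons]
              have hmRK : m ∈ RK :=
                (PySem.List.mem_sorted RK srkKeyL false m).mp (hs ▸ List.mem_cons_self)
              refine (srk_min?_eq_some srkRank FK m ((hmem m).mp hmRK) ?_
                (fun y _ h => srkRank_inj y m h)).symm
              intro x hx
              have hxRK : x ∈ RK := (hmem x).mpr hx
              exact srkRank_le_of_keyL_le m x (by rw [hall m hmRK, hall x hxRK])
                (PySem.List.key_head_sorted_le RK srkKeyL hs x hxRK)
          · -- first preferred hit: "rewards/open_env_reward"
            have hlow : ∀ k ∈ RK, 3 ≤ srkPrio k := by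
              intro k hk
              have n0 : srkPrio k ≠ 0 := fun hj =>
                absurd h0 (List.ne_nil_of_mem (List.mem_filter.mpr ⟨hk, by simp [(srkPrio_iff0 k).mp hj]⟩))
              have n1 : srkPrio k ≠ 1 := fun hj =>
                absurd h1 (List.ne_nil_of_mem (List.mem_filter.mpr ⟨hk, by simp [(srkPrio_iff1 k).mp hj]⟩))
              have n2 : srkPrio k ≠ 2 := fun hj =>
                absurd h2 (List.ne_nil_of_mem (List.mem_filter.mpr ⟨hk, by simp [(srkPrio_iff2 k).mp hj]⟩))
              omega
            have hA : srkPreferred.findSome?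
                (fun q => ((RK.foldl (fun d k => d.insert (PySem.Str.lower k) k) PySem.Dict.empty).get? q))
                = some ((RK.filter (fun k => PySem.Str.lower k == "rewards/open_env_reward")).getLast h3) := by
              simp only [srkPreferred, List.findSome?_cons, hget, h0, h1, h2, List.getLast?_nil,
                List.getLast?_eq_some_getLast h3]
            rw [hA]
            exact (srk_pref_branch RK FK hmem hpre 3 "rewards/open_env_reward" (by simp)
              srkPrio_iff3 hlow h3).symm
        · -- first preferred hit: "reward_mean"
          have hlow : ∀ k ∈ RK, 2 ≤ srkPrio k := by
            intro k hk
            have n0 : srkPrio k ≠ 0 := fun hj =>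
              absurd h0 (List.ne_nil_of_mem (List.mem_filter.mpr ⟨hk, by simp [(srkPrio_iff0 k).mp hj]⟩))
            have n1 : srkPrio k ≠ 1 := fun hj =>
              absurd h1 (List.ne_nil_of_mem (List.mem_filter.mpr ⟨hk, by simp [(srkPrio_iff1 k).mp hj]⟩))
            omega
          have hA : srkPreferred.findSome?
              (fun q => ((RK.foldl (fun d k => d.insert (PySem.Str.lower k) k) PySem.Dict.empty).get? q))
              = some ((RK.filter (fun k => PySem.Str.lower k == "reward_mean")).getLast h2) := by
            simp only [srkPreferred, List.findSome?_cons, hget, h0, h1, List.getLast?_nil,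
              List.getLast?_eq_some_getLast h2]
          rw [hA]
          exact (srk_pref_branch RK FK hmem hpre 2 "reward_mean" (by simp)
            srkPrio_iff2 hlow h2).symm
      · -- first preferred hit: "mean_reward"
        have hlow : ∀ k ∈ RK, 1 ≤ srkPrio k := by
          intro k hk
          have n0 : srkPrio k ≠ 0 := fun hj =>
            absurd h0 (List.ne_nil_of_mem (List.mem_filter.mpr ⟨hk, by simp [(srkPrio_iff0 k).mp hj]⟩))
          omega
        have hA : srkPreferred.findSome?
            (fun q => ((RK.foldl (fun d k => d.insert (PySem.Str.lower k) k) PySem.Dict.empty).get? q))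
            = some ((RK.filter (fun k => PySem.Str.lower k == "mean_reward")).getLast h1) := by
          simp only [srkPreferred, List.findSome?_cons, hget, h0, List.getLast?_nil,
            List.getLast?_eq_some_getLast h1]
        rw [hA]
        exact (srk_pref_branch RK FK hmem hpre 1 "mean_reward" (by simp)
          srkPrio_iff1 hlow h1).symm
    · -- first preferred hit: "reward"
      have hA : srkPreferred.findSome?
          (fun q => ((RK.foldl (fun d k => d.insert (PySem.Str.lower k) k) PySem.Dict.empty).get? q))
          = some ((RK.filter (fun k => PySem.Str.lower k == "reward")).getLast h0) := by
        simp only [srkPreferred, List.findSome?_cons, hget, List.getLast?_eq_some_getLast h0]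
      rw [hA]
      exact (srk_pref_branch RK FK hmem hpre 0 "reward" (by simp)
        srkPrio_iff0 (fun k _ => Nat.zero_le _) h0).symm

-- ===== VERDICT (by name: the statement is the Claim_ definition above) =====
theorem select_reward_key_spec : Claim_equal_select_reward_key := by
  intro lh _ hpre
  unfold Spec_select_reward_key
  rw [srk_alt_eq_min?]
  unfold select_reward_key
  dsimp only
  apply srk_core
  · intro k
    rw [List.mem_filter, PySem.List.mem_sorted, srk_mem_set]
    unfold srkOcc
    rw [List.mem_filter]
    simp [PySem.Set.empty, and_assoc, and_left_comm]
  · exact hpre
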